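-- pv_equiv track=rewrite | github.com/paulklemstine/factor | lean/demo/Pythagorean/QuadrupleGravityEnergy/modular_forms_demo.py | r3_unordered
-- ===== SOURCE A (Python) =====
-- import math
--
-- def r3_unordered(N):
--     """Count unordered representations with 0 ≤ a ≤ b ≤ c."""
--     reps = []
--     sqrt_N = int(math.isqrt(N))
--     for a in range(0, sqrt_N + 1):
--         for b in range(a, sqrt_N + 1):
--             rem = N - a*a - b*b
--             if rem < 0:
--                 break
--             c = int(math.isqrt(rem))
--             if c >= b and c*c == rem:
--                 reps.append((a, b, c))
--     return reps
-- ===== SOURCE B (Python) =====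
-- import math
--
-- def r3_unordered(N):
--     """Count unordered representations with 0 <= a <= b <= c."""
--     reps = []
--     for a in range(0, math.isqrt(N) + 1):
--         M = N - a*a
--         lo, hi = a, math.isqrt(M)
--         while lo <= hi:
--             s = lo*lo + hi*hi
--             if s == M:
--                 reps.append((a, lo, hi))
--                 lo += 1
--                 hi -= 1
--             elif s < M:
--                 lo += 1
--             else:
--                 hi -= 1
--     return reps
-- ===== Notes on version B (the rewrite author's own statement) =====
-- stated objective: alternative
-- what changed: For each a the inner scan over every b in [a, isqrt(N)] (computing c by isqrt each iteration) is replaced by a converging two-pointer sweep lo/hi that solves b²+c² = N-a² without any per-iteration isqrt.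
import Mathlib
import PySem

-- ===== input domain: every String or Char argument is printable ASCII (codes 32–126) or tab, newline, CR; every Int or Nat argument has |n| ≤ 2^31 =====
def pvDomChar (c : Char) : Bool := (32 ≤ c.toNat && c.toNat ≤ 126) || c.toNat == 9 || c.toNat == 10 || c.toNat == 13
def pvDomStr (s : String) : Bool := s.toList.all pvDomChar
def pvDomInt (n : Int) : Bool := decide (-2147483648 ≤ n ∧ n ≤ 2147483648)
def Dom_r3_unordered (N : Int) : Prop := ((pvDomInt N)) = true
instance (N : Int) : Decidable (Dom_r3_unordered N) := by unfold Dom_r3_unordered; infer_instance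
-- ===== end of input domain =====

-- B replaces A's inner scan over every b (computing c by isqrt each time) with a
-- converging two-pointer sweep solving b² + c² = N - a²; objective: alternative algorithm.

-- math.isqrt on a nonnegative int
def isqrtI (n : Int) : Int := ((Nat.sqrt n.toNat : Nat) : Int)

-- ===== PORT A =====
-- the inner 'for b in range(a, sqrt_N+1)' loop with its break; fuel = remaining b values
def aInner (N a : Int) : Int → Nat → List (Int × Int × Int)
  | _, 0 => []
  | b, fuel+1 =>
    let rem := N - a*a - b*b
    if rem < 0 then []
    else
      let c := isqrtI rem
      (if c ≥ b ∧ c*c = rem then [(a, b, c)] else []) ++ aInner N a (b+1) fuel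

def r3_unordered (N : Int) : List (Int × Int × Int) :=
  let sqrtN := isqrtI N
  (PySem.List.pyRange 0 (sqrtN + 1) 1).flatMap
    (fun a => aInner N a a (sqrtN + 1 - a).toNat)

-- ===== PORT B =====
-- the 'while lo <= hi' two-pointer loop; fuel = hi - lo + 1
def twoPtr (M : Int) : Int → Int → Nat → List (Int × Int)
  | _, _, 0 => []
  | lo, hi, fuel+1 =>
    if lo ≤ hi then
      let s := lo*lo + hi*hi
      if s = M then (lo, hi) :: twoPtr M (lo+1) (hi-1) fuel
      else if s < M then twoPtr M (lo+1) hi fuel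
      else twoPtr M lo (hi-1) fuel
    else []

def r3_unordered_alt (N : Int) : List (Int × Int × Int) :=
  (PySem.List.pyRange 0 (isqrtI N + 1) 1).flatMap
    (fun a =>
      let M := N - a*a
      let hi := isqrtI M
      (twoPtr M a hi (hi - a + 1).toNat).map (fun p => (a, p.1, p.2)))

-- ===== PRECONDITION & SPEC =====
-- Pre_ excludes N < 0, where math.isqrt(N) raises ValueError (both A and B raise there).
def Pre_r3_unordered (N : Int) : Prop := 0 ≤ N
instance (N : Int) : Decidable (Pre_r3_unordered N) := by unfold Pre_r3_unordered; infer_instance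
def pvWitness_r3_unordered : Int := (50)

def Spec_r3_unordered (N : Int) (out : List (Int × Int × Int)) : Prop := out = r3_unordered_alt N
instance (N : Int) (out : List (Int × Int × Int)) : Decidable (Spec_r3_unordered N out) := by unfold Spec_r3_unordered; infer_instance

-- ===== CLAIM (what is proved, stated in full; the proofs are below) =====
def Claim_equal_r3_unordered : Prop := ∀ (N : Int), Dom_r3_unordered N → Pre_r3_unordered N → Spec_r3_unordered N (r3_unordered N)

-- ===== LEMMAS AND PROOFS =====

-- the canonical solution list both loops compute: pairs (b, c) with lo ≤ b ≤ c ≤ hi,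
-- b² + c² = M, ascending in b (c is forced to be isqrt (M - b²))
def solEntry (M hi b : Int) : Option (Int × Int) :=
  if b*b ≤ M ∧ b ≤ isqrtI (M - b*b) ∧ isqrtI (M - b*b) ≤ hi ∧
     isqrtI (M - b*b) * isqrtI (M - b*b) = M - b*b
  then some (b, isqrtI (M - b*b)) else none

def sols (M lo hi : Int) : List (Int × Int) :=
  (PySem.List.pyRange lo (hi+1) 1).filterMap (solEntry M hi)

lemma isqrtI_nonneg (n : Int) : 0 ≤ isqrtI n := Int.natCast_nonneg _

lemma le_isqrtI_iff (c n : Int) (hc : 0 ≤ c) (hn : 0 ≤ n) :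
    c ≤ isqrtI n ↔ c * c ≤ n := by
  unfold isqrtI
  have h := Nat.le_sqrt (m := c.toNat) (n := n.toNat)
  have hcc : (c.toNat : Int) = c := Int.toNat_of_nonneg hc
  have hnn : (n.toNat : Int) = n := Int.toNat_of_nonneg hn
  constructor
  · intro hle
    have h1 : c.toNat ≤ Nat.sqrt n.toNat := by omega
    have h2 := h.mp h1
    have h3 : (c.toNat : Int) * c.toNat ≤ (n.toNat : Int) := by exact_mod_cast h2
    rw [hcc, hnn] at h3; exact h3
  · intro hle
    have h1 : c.toNat * c.toNat ≤ n.toNat := by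
      have h2 : (c.toNat : Int) * c.toNat ≤ (n.toNat : Int) := by rw [hcc, hnn]; exact hle
      exact_mod_cast h2
    have := h.mpr h1
    omega

lemma isqrtI_mono (m n : Int) (h : m ≤ n) : isqrtI m ≤ isqrtI n := by
  unfold isqrtI
  have h1 : m.toNat ≤ n.toNat := by omega
  exact Int.ofNat_le.mpr (Nat.sqrt_le_sqrt h1)

lemma isqrtI_exact (c : Int) (hc : 0 ≤ c) : isqrtI (c*c) = c := by
  rcases Int.eq_ofNat_of_zero_le hc with ⟨m, rfl⟩
  unfold isqrtI
  have h1 : ((m : Int) * (m : Int)).toNat = m ^ 2 := by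
    rw [← Nat.cast_mul, Int.toNat_natCast]; ring
  rw [h1, Nat.sqrt_eq']

-- A's inner loop computes exactly sols (N - a²) b (isqrt (N - a²))
lemma aInner_eq_sols (N a : Int) (ha : 0 ≤ a) (hMa : a*a ≤ N) :
    ∀ (fuel : Nat) (b : Int), a ≤ b → (isqrtI N + 1 - b).toNat ≤ fuel →
      aInner N a b fuel
        = (sols (N - a*a) b (isqrtI (N - a*a))).map (fun p => (a, p.1, p.2)) := by
  have hM0 : 0 ≤ N - a*a := by omega
  have hmono : isqrtI (N - a*a) ≤ isqrtI N := isqrtI_mono _ _ (by nlinarith)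
  intro fuel
  induction fuel with
  | zero =>
    intro b hab hfuel
    have hbN : isqrtI N + 1 ≤ b := by omega
    rw [sols, PySem.List.pyRange_one_eq_nil (by omega : isqrtI (N - a*a) + 1 ≤ b)]
    simp [aInner]
  | succ fuel ih =>
    intro b hab hfuel
    have hb : 0 ≤ b := le_trans ha hab
    by_cases hrem : N - a*a - b*b < 0
    · -- break: b² > M, so b > isqrt M and sols is empty
      have hempty : isqrtI (N - a*a) + 1 ≤ b := by
        by_contra hcon
        have hble : b ≤ isqrtI (N - a*a) := by omega
        have := (le_isqrtI_iff b (N - a*a) hb hM0).mp hble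
        omega
      simp only [aInner, if_pos (by omega : N - a*a - b*b < 0)]
      rw [sols, PySem.List.pyRange_one_eq_nil hempty]
      simp
    · rw [not_lt] at hrem
      have hbM : b ≤ isqrtI (N - a*a) := (le_isqrtI_iff b (N - a*a) hb hM0).mpr (by omega)
      have hrec := ih (b+1) (by omega) (by omega)
      simp only [aInner, if_neg (by omega : ¬ N - a*a - b*b < 0)]
      rw [sols, PySem.List.pyRange_one_cons (by omega : b < isqrtI (N - a*a) + 1),
          List.filterMap_cons]
      have hcle : isqrtI (N - a*a - b*b) ≤ isqrtI (N - a*a) := isqrtI_mono _ _ (by nlinarith)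
      by_cases hcond : isqrtI (N - a*a - b*b) ≥ b ∧
          isqrtI (N - a*a - b*b) * isqrtI (N - a*a - b*b) = N - a*a - b*b
      · rw [if_pos hcond]
        rw [solEntry, if_pos ⟨by omega, by
            have := hcond.1
            rw [show N - a*a - b*b = N - a*a - b*b by rfl] at this
            omega, by
            have : N - a*a - b*b = N - a*a - b*b := rfl
            exact hcle, by
            have := hcond.2
            omega⟩]
        rw [sols] at hrec
        simp only [List.map_cons, List.singleton_append, hrec]
      · rw [if_neg hcond, solEntry, if_neg (by
          rintro ⟨h1, h2, h3, h4⟩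
          exact hcond ⟨by omega, by omega⟩)]
        rw [sols] at hrec
        simp only [List.nil_append, hrec]

-- the three two-pointer step equations on sols
lemma sols_eq_cons (M lo hi : Int) (hlo : 0 ≤ lo) (hlh : lo ≤ hi) (hs : lo*lo + hi*hi = M) :
    sols M lo hi = (lo, hi) :: sols M (lo+1) (hi-1) := by
  have hhi : 0 ≤ hi := le_trans hlo hlh
  unfold sols
  rw [PySem.List.pyRange_one_cons (by omega : lo < hi + 1), List.filterMap_cons]
  have hch : isqrtI (M - lo*lo) = hi := by
    rw [show M - lo*lo = hi*hi by omega, isqrtI_exact hi hhi]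
  have hhead : solEntry M hi lo = some (lo, hi) := by
    rw [solEntry, hch]
    exact if_pos ⟨by nlinarith, hlh, le_refl hi, by omega⟩
  rw [hhead]
  show (lo, hi) :: _ = (lo, hi) :: _
  congr 1
  rw [show hi - 1 + 1 = hi by ring]
  by_cases hlh2 : lo + 1 ≤ hi
  · rw [PySem.List.pyRange_one_succ_right hlh2, List.filterMap_append]
    have hlast : solEntry M hi hi = none := by
      rw [solEntry, if_neg]
      rintro ⟨h1, h2, h3, h4⟩
      have hceq : isqrtI (M - hi*hi) = lo := by
        rw [show M - hi*hi = lo*lo by omega, isqrtI_exact lo hlo]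
      omega
    rw [show List.filterMap (solEntry M hi) [hi] = [] by simp [hlast], List.append_nil]
    apply List.filterMap_congr
    intro b hbmem
    have hbb := (PySem.List.mem_pyRange_one).mp hbmem
    rw [solEntry, solEntry]
    by_cases hc : b*b ≤ M ∧ b ≤ isqrtI (M - b*b) ∧ isqrtI (M - b*b) ≤ hi ∧
        isqrtI (M - b*b) * isqrtI (M - b*b) = M - b*b
    · have hne : isqrtI (M - b*b) ≠ hi := by
        intro heq
        have hbl : b*b = lo*lo := by
          have h4 := hc.2.2.2
          rw [heq] at h4
          omega
        have : lo*lo < b*b :=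
          mul_self_lt_mul_self hlo (by omega : lo < b)
        omega
      rw [if_pos hc, if_pos ⟨hc.1, hc.2.1, by omega, hc.2.2.2⟩]
    · rw [if_neg hc, if_neg (by rintro ⟨h1, h2, h3, h4⟩; exact hc ⟨h1, h2, by omega, h4⟩)]
  · rw [PySem.List.pyRange_one_eq_nil (by omega : hi + 1 ≤ lo + 1),
        PySem.List.pyRange_one_eq_nil (by omega : hi ≤ lo + 1)]
    simp

lemma sols_drop_lo (M lo hi : Int) (hlo : 0 ≤ lo) (hlh : lo ≤ hi) (hs : lo*lo + hi*hi < M) :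
    sols M lo hi = sols M (lo+1) hi := by
  unfold sols
  rw [PySem.List.pyRange_one_cons (by omega : lo < hi + 1), List.filterMap_cons]
  have hhead : solEntry M hi lo = none := by
    rw [solEntry, if_neg]
    rintro ⟨h1, h2, h3, h4⟩
    have hc0 : 0 ≤ isqrtI (M - lo*lo) := isqrtI_nonneg _
    have hhi : 0 ≤ hi := le_trans hlo hlh
    have : isqrtI (M - lo*lo) * isqrtI (M - lo*lo) ≤ hi * hi :=
      mul_self_le_mul_self hc0 h3
    omega
  rw [hhead]

lemma sols_drop_hi (M lo hi : Int) (hlo : 0 ≤ lo) (hlh : lo ≤ hi) (hs : M < lo*lo + hi*hi) :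
    sols M lo hi = sols M lo (hi-1) := by
  have hhi : 0 ≤ hi := le_trans hlo hlh
  unfold sols
  rw [show hi - 1 + 1 = hi by ring,
      PySem.List.pyRange_one_succ_right (by omega : lo ≤ hi), List.filterMap_append]
  have hlast : solEntry M hi hi = none := by
    rw [solEntry, if_neg]
    rintro ⟨h1, h2, h3, h4⟩
    have hceq : isqrtI (M - hi*hi) = hi := by omega
    rw [hceq] at h4
    have : lo*lo ≤ hi*hi := mul_self_le_mul_self hlo hlh
    omega
  rw [show List.filterMap (solEntry M hi) [hi] = [] by simp [hlast], List.append_nil]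
  apply List.filterMap_congr
  intro b hbmem
  have hbb := (PySem.List.mem_pyRange_one).mp hbmem
  have hb0 : 0 ≤ b := le_trans hlo hbb.1
  rw [solEntry, solEntry]
  by_cases hc : b*b ≤ M ∧ b ≤ isqrtI (M - b*b) ∧ isqrtI (M - b*b) ≤ hi ∧
      isqrtI (M - b*b) * isqrtI (M - b*b) = M - b*b
  · have hne : isqrtI (M - b*b) ≠ hi := by
      intro heq
      have h4 := hc.2.2.2
      rw [heq] at h4
      have : b*b < lo*lo := by omega
      have hge : lo*lo ≤ b*b := mul_self_le_mul_self hlo hbb.1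
      omega
    rw [if_pos hc, if_pos ⟨hc.1, hc.2.1, by omega, hc.2.2.2⟩]
  · rw [if_neg hc, if_neg (by rintro ⟨h1, h2, h3, h4⟩; exact hc ⟨h1, h2, by omega, h4⟩)]

-- B's two-pointer loop computes exactly sols M lo hi
lemma twoPtr_eq_sols (M : Int) :
    ∀ (fuel : Nat) (lo hi : Int), 0 ≤ lo → (hi - lo + 1).toNat ≤ fuel →
      twoPtr M lo hi fuel = sols M lo hi := by
  intro fuel
  induction fuel with
  | zero =>
    intro lo hi hlo hfuel
    rw [sols, PySem.List.pyRange_one_eq_nil (by omega : hi + 1 ≤ lo)]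
    simp [twoPtr]
  | succ fuel ih =>
    intro lo hi hlo hfuel
    by_cases hlh : lo ≤ hi
    · simp only [twoPtr, if_pos hlh]
      by_cases hs : lo*lo + hi*hi = M
      · rw [if_pos hs, ih (lo+1) (hi-1) (by omega) (by omega),
            sols_eq_cons M lo hi hlo hlh hs]
      · rw [if_neg hs]
        by_cases hlt : lo*lo + hi*hi < M
        · rw [if_pos hlt, ih (lo+1) hi (by omega) (by omega),
              sols_drop_lo M lo hi hlo hlh hlt]
        · rw [if_neg hlt, ih lo (hi-1) hlo (by omega),
              sols_drop_hi M lo hi hlo hlh (by omega)]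
    · simp only [twoPtr, if_neg hlh]
      rw [sols, PySem.List.pyRange_one_eq_nil (by omega : hi + 1 ≤ lo)]
      simp

lemma flatMap_congr_mem {α β : Type} (l : List α) (f g : α → List β)
    (h : ∀ a ∈ l, f a = g a) : l.flatMap f = l.flatMap g := by
  induction l with
  | nil => rfl
  | cons x xs ih =>
    simp only [List.flatMap_cons, h x (List.mem_cons_self), ih (fun a ha => h a (List.mem_cons_of_mem _ ha))]

-- ===== VERDICT (by name: the statement is the Claim_ definition above) =====
theorem r3_unordered_spec : Claim_equal_r3_unordered := by
  intro N _ hN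
  unfold Spec_r3_unordered r3_unordered r3_unordered_alt
  simp only
  apply flatMap_congr_mem
  intro a hamem
  have hbb := (PySem.List.mem_pyRange_one).mp hamem
  have ha0 : 0 ≤ a := hbb.1
  have haN : a ≤ isqrtI N := by omega
  have hMa : a*a ≤ N := (le_isqrtI_iff a N ha0 hN).mp haN
  rw [aInner_eq_sols N a ha0 hMa _ a (le_refl a) (le_refl _)]
  rw [twoPtr_eq_sols (N - a*a) _ a (isqrtI (N - a*a)) ha0 (le_refl _)]
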